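-- pv_equiv track=rewrite | github.com/TheNeuralBit/project-euler | solutions/028/sol.py | gen_corners
-- ===== SOURCE A (Python) =====
-- def gen_corners(size):
--     curr = 1
--     step = 2
--     yield curr
--     while step < size:
--         for i in range(4):
--             curr += step
--             yield curr
--         step += 2
-- ===== SOURCE B (Python) =====
-- def gen_corners(size):
--     yield 1
--     k = 1
--     while 2 * k < size:
--         base = (2 * k + 1) ** 2
--         yield base - 6 * k
--         yield base - 4 * k
--         yield base - 2 * k
--         yield base
--         k += 1
-- ===== Notes on version B (the rewrite author's own statement) =====
-- stated objective: alternative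
-- what changed: Replaces the running accumulator (curr += step four times per ring) with a per-ring closed form: base = (2k+1)^2 and the four corners base-6k, base-4k, base-2k, base.
import Mathlib
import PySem

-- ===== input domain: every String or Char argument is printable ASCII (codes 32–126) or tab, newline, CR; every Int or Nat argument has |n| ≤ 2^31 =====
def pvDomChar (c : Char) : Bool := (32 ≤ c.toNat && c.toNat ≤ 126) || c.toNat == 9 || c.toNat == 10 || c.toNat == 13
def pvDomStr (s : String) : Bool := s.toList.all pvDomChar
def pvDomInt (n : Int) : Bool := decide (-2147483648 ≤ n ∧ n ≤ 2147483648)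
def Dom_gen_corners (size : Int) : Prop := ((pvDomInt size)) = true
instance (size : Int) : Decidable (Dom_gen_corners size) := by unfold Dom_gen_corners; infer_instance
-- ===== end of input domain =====

-- B replaces A's running accumulator with a per-ring closed form (base = (2k+1)^2); same values, same cost.

-- ===== PORT A =====
-- A's generator, listed: the while loop over step (2,4,6,…), each ring adding step four times.
def genCornersLoopA (size step curr : Int) : List Int :=
  if step < size then
    let c1 := curr + step
    let c2 := c1 + step
    let c3 := c2 + step
    let c4 := c3 + step
    c1 :: c2 :: c3 :: c4 :: genCornersLoopA size (step + 2) c4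
  else []
termination_by (size - step).toNat
decreasing_by
  omega

def gen_corners (size : Int) : List Int := 1 :: genCornersLoopA size 2 1

-- ===== PORT B =====
-- B's generator, listed: rings indexed by k while 2k < size, corners from the closed form.
def genCornersLoopB (size k : Int) : List Int :=
  if 2 * k < size then
    let base := (2 * k + 1) ^ 2
    (base - 6 * k) :: (base - 4 * k) :: (base - 2 * k) :: base :: genCornersLoopB size (k + 1)
  else []
termination_by (size - 2 * k).toNat
decreasing_by
  omega

def gen_corners_alt (size : Int) : List Int := 1 :: genCornersLoopB size 1

-- ===== PRECONDITION & SPEC =====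
def Spec_gen_corners (size : Int) (out : List Int) : Prop := out = gen_corners_alt size
instance (size : Int) (out : List Int) : Decidable (Spec_gen_corners size out) := by unfold Spec_gen_corners; infer_instance

-- ===== CLAIM (what is proved, stated in full; the proofs are below) =====
def Claim_equal_gen_corners : Prop := ∀ (size : Int), Dom_gen_corners size → Spec_gen_corners size (gen_corners size)

-- ===== LEMMAS AND PROOFS =====

-- Invariant: at the start of ring k (step = 2k), A's accumulator holds (2k-1)^2.
theorem genCorners_loop_eq (size : Int) : ∀ (n : Nat) (k : Int),
    (size - 2 * k).toNat ≤ n →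
    genCornersLoopA size (2 * k) ((2 * k - 1) ^ 2) = genCornersLoopB size k := by
  intro n
  induction n with
  | zero =>
    intro k hk
    rw [genCornersLoopA, genCornersLoopB]
    have h1 : ¬ (2 * k < size) := by omega
    simp [h1]
  | succ n ih =>
    intro k hk
    rw [genCornersLoopA, genCornersLoopB]
    by_cases h : 2 * k < size
    · simp only [h, if_pos]
      have hstep : (2 : Int) * (k + 1) = 2 * k + 2 := by ring
      have hcurr : ((2 : Int) * k - 1) ^ 2 + 2 * k + 2 * k + 2 * k + 2 * k
          = (2 * (k + 1) - 1) ^ 2 := by ring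
      have hrec : genCornersLoopA size (2 * k + 2) ((2 * k - 1) ^ 2 + 2 * k + 2 * k + 2 * k + 2 * k)
          = genCornersLoopB size (k + 1) := by
        have := ih (k + 1) (by omega)
        rw [hcurr]
        rw [hstep] at this ⊢
        exact this
      rw [hrec]
      simp only [List.cons.injEq]
      exact ⟨by ring, by ring, by ring, by ring, trivial⟩
    · simp [h]

-- ===== VERDICT (by name: the statement is the Claim_ definition above) =====
theorem gen_corners_spec : Claim_equal_gen_corners := by
  intro size _
  unfold Spec_gen_corners gen_corners gen_corners_alt
  have h := genCorners_loop_eq size (size - 2).toNat 1 (by omega)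
  norm_num at h
  rw [h]
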